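-- pv_equiv track=rewrite | github.com/axellbrendow/leetcode | zigzag-iterator.py | iterate_n_arrays
-- ===== SOURCE A (Python) =====
-- def iterate_n_arrays(arrays):
-- 	i = 0  # 4
-- 	while True:
-- 		found = False  # False
-- 		for array in arrays:  # array = [*1,*2], array = [*3,*4,*5,*6]
-- 			if i < len(array):
-- 				found = True
-- 				yield array[i]
-- 		if not found: break
-- 		i += 1
-- ===== SOURCE B (Python) =====
-- def iterate_n_arrays(arrays):
--     # Round-robin over an "active" list of (array, index) pairs; an array is
--     # dropped permanently once exhausted instead of being rescanned each round.
--     active = [(a, 0) for a in arrays if a]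
--     while active:
--         nxt = []
--         for a, i in active:
--             yield a[i]
--             if i + 1 < len(a):
--                 nxt.append((a, i + 1))
--         active = nxt
-- ===== Notes on version B (the rewrite author's own statement) =====
-- stated objective: alternative
-- what changed: B keeps a shrinking active list of (array, index) pairs and drops an array permanently once exhausted, instead of A's rescanning every array on every round until a whole round finds nothing; it trades A's repeated full scans for maintaining the active list.
import Mathlib
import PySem

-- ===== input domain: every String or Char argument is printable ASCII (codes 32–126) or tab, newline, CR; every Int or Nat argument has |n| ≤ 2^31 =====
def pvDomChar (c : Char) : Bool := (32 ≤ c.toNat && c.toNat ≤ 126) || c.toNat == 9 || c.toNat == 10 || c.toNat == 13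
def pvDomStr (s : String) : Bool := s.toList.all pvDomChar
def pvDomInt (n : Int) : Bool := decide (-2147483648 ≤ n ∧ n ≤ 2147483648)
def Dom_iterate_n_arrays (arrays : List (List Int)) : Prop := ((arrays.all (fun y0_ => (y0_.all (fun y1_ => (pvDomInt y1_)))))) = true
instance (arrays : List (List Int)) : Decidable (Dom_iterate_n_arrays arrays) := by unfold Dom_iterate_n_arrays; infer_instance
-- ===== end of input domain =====

-- B replaces A's per-round rescan of all arrays by a shrinking active list of
-- (array, index) pairs that drops an array once exhausted, a different traversal of the data.
-- A is a generator; the ports collect its yields into a list.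

-- ===== PORT A =====
-- inner 'for array in arrays: if i < len(array): found = True; yield array[i]'
-- (state = (found, yields so far); array[i] with 0 ≤ i < len is exactly getD i 0)
def pvRowA (arrays : List (List Int)) (i : Nat) : Bool × List Int :=
  arrays.foldl
    (fun s a => if i < a.length then (true, s.2 ++ [a.getD i 0]) else s)
    (false, [])

def pvMaxLen (arrays : List (List Int)) : Nat :=
  arrays.foldr (fun a m => max a.length m) 0

theorem pvMaxLen_mem (arrays : List (List Int)) (a : List Int) (ha : a ∈ arrays) :
    a.length ≤ pvMaxLen arrays := by
  induction arrays with
  | nil => cases ha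
  | cons b t ih =>
    rcases List.mem_cons.1 ha with rfl | hm
    · simp [pvMaxLen]
    · have := ih hm; simp [pvMaxLen] at this ⊢; omega

theorem pvRowA_found_exists (arrays : List (List Int)) (i : Nat) (b : Bool) (out : List Int)
    (h : (arrays.foldl (fun s a => if i < a.length then (true, s.2 ++ [a.getD i 0]) else s)
            (b, out)).1 = true) : b = true ∨ ∃ a ∈ arrays, i < a.length := by
  induction arrays generalizing b out with
  | nil => exact Or.inl h
  | cons a t ih =>
    simp only [List.foldl] at h
    by_cases hc : i < a.length
    · exact Or.inr ⟨a, List.mem_cons_self, hc⟩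
    · simp only [hc, if_neg, not_false_iff] at h
      rcases ih _ _ h with hb | ⟨a', ha', hl⟩
      · exact Or.inl hb
      · exact Or.inr ⟨a', List.mem_cons_of_mem _ ha', hl⟩

theorem pvRowA_found_lt (arrays : List (List Int)) (i : Nat)
    (h : (arrays.foldl (fun s a => if i < a.length then (true, s.2 ++ [a.getD i 0]) else s)
            (false, [])).1 = true) : i < pvMaxLen arrays := by
  rcases pvRowA_found_exists arrays i false [] h with hb | ⟨a, ha, hl⟩
  · cases hb
  · exact lt_of_lt_of_le hl (pvMaxLen_mem arrays a ha)

-- 'while True: … if not found: break; i += 1'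
def pvALoop (arrays : List (List Int)) (i : Nat) : List Int :=
  let r := pvRowA arrays i
  if h : r.1 = true then r.2 ++ pvALoop arrays (i + 1) else []
termination_by pvMaxLen arrays - i
decreasing_by
  have := pvRowA_found_lt arrays i h
  omega

def iterate_n_arrays (arrays : List (List Int)) : List Int :=
  pvALoop arrays 0

-- ===== PORT B =====
-- one pass over the active list: yields a[i] for each pair, keeps (a, i+1) if not exhausted
def pvBStep (active : List (List Int × Nat)) : List Int × List (List Int × Nat) :=
  active.foldl
    (fun s p =>
      if p.2 + 1 < p.1.length then (s.1 ++ [p.1.getD p.2 0], s.2 ++ [(p.1, p.2 + 1)])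
      else (s.1 ++ [p.1.getD p.2 0], s.2))
    ([], [])

def pvBMeasure (active : List (List Int × Nat)) : Nat :=
  active.foldr (fun p s => (p.1.length - p.2) + 1 + s) 0

theorem pvBStep_eq (active : List (List Int × Nat)) :
    pvBStep active =
      (active.map (fun p => p.1.getD p.2 0),
       (active.filter (fun p => decide (p.2 + 1 < p.1.length))).map (fun p => (p.1, p.2 + 1))) := by
  suffices h : ∀ (o : List Int) (n : List (List Int × Nat)),
      active.foldl
        (fun s p =>
          if p.2 + 1 < p.1.length then (s.1 ++ [p.1.getD p.2 0], s.2 ++ [(p.1, p.2 + 1)])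
          else (s.1 ++ [p.1.getD p.2 0], s.2)) (o, n) =
      (o ++ active.map (fun p => p.1.getD p.2 0),
       n ++ (active.filter (fun p => decide (p.2 + 1 < p.1.length))).map (fun p => (p.1, p.2 + 1))) by
    simpa using h [] []
  induction active with
  | nil => simp
  | cons p t ih =>
    intro o n
    by_cases hc : p.2 + 1 < p.1.length <;>
      simp only [List.foldl, List.filter, hc, if_pos, if_neg, not_false_iff, decide_true,
        decide_false] <;> rw [ih] <;> simp

theorem pvBMeasure_step_le (active : List (List Int × Nat)) :
    pvBMeasure ((active.filter (fun p => decide (p.2 + 1 < p.1.length))).map (fun p => (p.1, p.2 + 1)))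
      ≤ pvBMeasure active := by
  induction active with
  | nil => simp [pvBMeasure]
  | cons p t ih =>
    by_cases hc : p.2 + 1 < p.1.length <;>
      simp [List.filter, hc, pvBMeasure] at ih ⊢ <;> omega

theorem pvBMeasure_step_lt (active : List (List Int × Nat)) (h : active ≠ []) :
    pvBMeasure (pvBStep active).2 < pvBMeasure active := by
  rw [pvBStep_eq]
  cases active with
  | nil => exact absurd rfl h
  | cons p t =>
    have := pvBMeasure_step_le t
    by_cases hc : p.2 + 1 < p.1.length <;>
      simp [List.filter, hc, pvBMeasure] at this ⊢ <;> omega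

-- 'while active: … active = nxt'
def pvBLoop (active : List (List Int × Nat)) : List Int :=
  if h : active = [] then []
  else
    let st := pvBStep active
    st.1 ++ pvBLoop st.2
termination_by pvBMeasure active
decreasing_by exact pvBMeasure_step_lt active h

-- 'active = [(a, 0) for a in arrays if a]'
def iterate_n_arrays_alt (arrays : List (List Int)) : List Int :=
  pvBLoop ((arrays.filter (fun a => !a.isEmpty)).map (fun a => (a, 0)))

-- ===== PRECONDITION & SPEC =====
def Spec_iterate_n_arrays (arrays : List (List Int)) (out : List Int) : Prop := out = iterate_n_arrays_alt arrays
instance (arrays : List (List Int)) (out : List Int) : Decidable (Spec_iterate_n_arrays arrays out) := by unfold Spec_iterate_n_arrays; infer_instance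

-- ===== CLAIM (what is proved, stated in full; the proofs are below) =====
def Claim_equal_iterate_n_arrays : Prop := ∀ (arrays : List (List Int)), Dom_iterate_n_arrays arrays → Spec_iterate_n_arrays arrays (iterate_n_arrays arrays)

-- ===== LEMMAS AND PROOFS =====

-- B's active list after i rounds, as a function of arrays and i
def pvActiveOf (arrays : List (List Int)) (i : Nat) : List (List Int × Nat) :=
  (arrays.filter (fun a => decide (i < a.length))).map (fun a => (a, i))

theorem pvRowA_eq (arrays : List (List Int)) (i : Nat) :
    pvRowA arrays i =
      (arrays.any (fun a => decide (i < a.length)),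
       (arrays.filter (fun a => decide (i < a.length))).map (fun a => a.getD i 0)) := by
  suffices h : ∀ (b : Bool) (out : List Int),
      arrays.foldl (fun s a => if i < a.length then (true, s.2 ++ [a.getD i 0]) else s) (b, out) =
      ((b || arrays.any (fun a => decide (i < a.length))),
       out ++ (arrays.filter (fun a => decide (i < a.length))).map (fun a => a.getD i 0)) by
    simpa [pvRowA] using h false []
  induction arrays with
  | nil => simp
  | cons a t ih =>
    intro b out
    by_cases hc : i < a.length <;>
      simp only [List.foldl, List.filter, hc, if_pos, if_neg, not_false_iff, decide_true,
        decide_false] <;> rw [ih] <;> simp [hc]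

theorem pvActiveOf_next (arrays : List (List Int)) (i : Nat) :
    (pvBStep (pvActiveOf arrays i)).2 = pvActiveOf arrays (i + 1) := by
  rw [pvBStep_eq]
  simp only [pvActiveOf, List.filter_map, List.map_map]
  induction arrays with
  | nil => simp
  | cons a t ih =>
    by_cases h1 : i + 1 < a.length
    · have h0 : i < a.length := by omega
      simp [List.filter, h0, h1, Function.comp] at ih ⊢; exact ih
    · by_cases h0 : i < a.length <;>
        simp [List.filter, h0, h1, Function.comp] at ih ⊢ <;> exact ih

theorem pvActiveOf_outs (arrays : List (List Int)) (i : Nat) :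
    (pvBStep (pvActiveOf arrays i)).1 = (pvRowA arrays i).2 := by
  rw [pvBStep_eq, pvRowA_eq]
  simp [pvActiveOf, List.map_map, Function.comp]

theorem pvFound_iff (arrays : List (List Int)) (i : Nat) :
    (pvRowA arrays i).1 = true ↔ pvActiveOf arrays i ≠ [] := by
  rw [pvRowA_eq]
  simp [pvActiveOf, List.any_eq_true, List.filter_eq_nil_iff]

theorem pvLoop_agree (arrays : List (List Int)) (i : Nat) :
    pvALoop arrays i = pvBLoop (pvActiveOf arrays i) := by
  by_cases hf : (pvRowA arrays i).1 = true
  · have hne : pvActiveOf arrays i ≠ [] := (pvFound_iff arrays i).1 hf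
    rw [pvALoop, pvBLoop]
    simp only [hf, dif_pos, hne, dif_neg, not_false_iff]
    rw [pvActiveOf_outs, pvActiveOf_next, pvLoop_agree arrays (i + 1)]
  · have hne : pvActiveOf arrays i = [] := by
      by_contra hc; exact hf ((pvFound_iff arrays i).2 hc)
    rw [pvALoop, pvBLoop]
    simp [hf, hne]
termination_by pvMaxLen arrays - i
decreasing_by
  have := pvRowA_found_lt arrays i hf
  omega

theorem pvInit_active (arrays : List (List Int)) :
    (arrays.filter (fun a => !a.isEmpty)).map (fun a => (a, 0)) = pvActiveOf arrays 0 := by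
  unfold pvActiveOf
  congr 1
  apply List.filter_congr
  intro a _
  cases a <;> simp

-- ===== VERDICT (by name: the statement is the Claim_ definition above) =====
theorem iterate_n_arrays_spec : Claim_equal_iterate_n_arrays := by
  intro arrays _
  unfold Spec_iterate_n_arrays iterate_n_arrays iterate_n_arrays_alt
  rw [pvInit_active]
  exact pvLoop_agree arrays 0
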